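-- pv_equiv track=rewrite | github.com/Karanjot1995/data-structures-prep | GoldmanSachs/IP Freq count.py | IPfreqCount
-- ===== SOURCE A (Python) =====
-- def IPfreqCount(addresses):
--   maxi = 0
--   hmap={}
--
--   for addr in addresses:
--     addr = addr.split()[0]
--     hmap[addr] = hmap.get(addr, 0)+1
--     maxi = max(maxi, hmap[addr])
--
--   maxIp = [ip for ip, count in hmap.items() if count == maxi]
--
--   if len(maxIp) > 1:
--     return ','.join(sorted(maxIp))
--   else:
--     return maxIp[0]
-- ===== SOURCE B (Python) =====
-- def IPfreqCount(addresses):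
--   keys = sorted(addr.split()[0] for addr in addresses)
--   best = 0
--   winners = []
--   i = 0
--   n = len(keys)
--   while i < n:
--     j = i + 1
--     while j < n and keys[j] == keys[i]:
--       j += 1
--     run = j - i
--     if run > best:
--       best = run
--       winners = [keys[i]]
--     elif run == best:
--       winners.append(keys[i])
--     i = j
--   if len(winners) > 1:
--     return ','.join(winners)
--   return winners[0]
-- ===== Notes on version B (the rewrite author's own statement) =====
-- stated objective: alternative
-- what changed: B uses no hash map at all: it sorts the extracted first tokens and scans the sorted list run by run, keeping a running (best, winners) argmax accumulator, so equal keys are counted by run length and the tie winners come out already in sorted order (no items() filter and no final sort of the winners).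
import Mathlib
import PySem

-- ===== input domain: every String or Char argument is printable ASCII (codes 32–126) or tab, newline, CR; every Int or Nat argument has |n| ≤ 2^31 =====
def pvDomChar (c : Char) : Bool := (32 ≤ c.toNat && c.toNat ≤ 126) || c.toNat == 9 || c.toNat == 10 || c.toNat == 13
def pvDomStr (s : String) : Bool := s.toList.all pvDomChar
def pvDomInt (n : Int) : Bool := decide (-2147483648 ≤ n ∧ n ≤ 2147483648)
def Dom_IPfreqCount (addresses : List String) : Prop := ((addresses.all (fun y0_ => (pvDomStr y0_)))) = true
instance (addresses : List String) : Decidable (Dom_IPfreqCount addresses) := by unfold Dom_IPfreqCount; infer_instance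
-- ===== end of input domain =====

-- B replaces A's dict frequency table by a dict-free sort-then-run-scan with a running
-- (best, winners) accumulator: an alternative algorithm of the same result, not claimed faster.

-- ===== PORT A =====
def IPfreqCount (addresses : List String) : String :=
  let st := addresses.foldl
    (fun (s : Int × PySem.Dict String Int) addr =>
      let a := (PySem.Str.split₀ addr).headD ""   -- addr.split()[0]; total form, the IndexError case is outside Pre_
      let h := s.2.insert a (s.2.getD a 0 + 1)
      (max s.1 (h.getD a 0), h))
    (0, PySem.Dict.empty)
  let maxIp := (st.2.items.filter (fun p => p.2 == st.1)).map Prod.fst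
  if maxIp.length > 1 then
    PySem.Str.join "," (PySem.List.sorted maxIp (fun x => x))
  else
    (PySem.List.pyGet? maxIp 0).getD ""   -- maxIp[0]; IndexError (empty input) is outside Pre_

-- ===== PORT B =====
-- the 'while i < n:' loop of Source B over the SORTED key list, ported as structural recursion on
-- the remaining suffix keys[i:]: the inner 'while j < n and keys[j] == keys[i]' measures the
-- equal run after the head (exactly takeWhile), and 'i = j' continues past it (dropWhile)
lemma pvScan_dec (k : String) (t : List String) :
    (t.dropWhile (fun x => x == k)).length < (k :: t).length := by
  have := (List.dropWhile_sublist (p := fun x => x == k) (l := t)).length_le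
  simp only [List.length_cons]
  omega

def pvScan : List String → Int → List String → Int × List String
  | [], best, winners => (best, winners)
  | k :: t, best, winners =>
    let run : Int := ((1 + (t.takeWhile (fun x => x == k)).length : Nat) : Int)
    let rest := t.dropWhile (fun x => x == k)
    if run > best then pvScan rest run [k]
    else if run == best then pvScan rest best (winners ++ [k])
    else pvScan rest best winners
termination_by l => l.length
decreasing_by all_goals exact pvScan_dec _ _

def IPfreqCount_alt (addresses : List String) : String :=
  let keys := PySem.List.sorted
    (addresses.map (fun addr => (PySem.Str.split₀ addr).headD ""))  -- addr.split()[0]; total form, IndexError outside Pre_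
    (fun x => x)
  let st := pvScan keys 0 []
  let winners := st.2
  if winners.length > 1 then
    PySem.Str.join "," winners
  else
    (PySem.List.pyGet? winners 0).getD ""   -- winners[0]; IndexError (empty input) is outside Pre_

-- ===== PRECONDITION & SPEC =====
-- Pre_ excludes exactly the inputs where A raises: the empty list (maxIp[0] → IndexError) and
-- lists containing a whitespace-only/empty address (addr.split()[0] → IndexError).
def Pre_IPfreqCount (addresses : List String) : Prop :=
  addresses ≠ [] ∧ ∀ a ∈ addresses, PySem.Str.split₀ a ≠ []
instance (addresses : List String) : Decidable (Pre_IPfreqCount addresses) := by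
  unfold Pre_IPfreqCount; infer_instance
def pvWitness_IPfreqCount : List String := ["1.1.1.1 a", "2.2.2.2", "1.1.1.1"]

def Spec_IPfreqCount (addresses : List String) (out : String) : Prop := out = IPfreqCount_alt addresses
instance (addresses : List String) (out : String) : Decidable (Spec_IPfreqCount addresses out) := by
  unfold Spec_IPfreqCount; infer_instance

-- ===== CLAIM (what is proved, stated in full; the proofs are below) =====
def Claim_equal_IPfreqCount : Prop := ∀ (addresses : List String), Dom_IPfreqCount addresses → Pre_IPfreqCount addresses → Spec_IPfreqCount addresses (IPfreqCount addresses)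

-- ===== LEMMAS AND PROOFS =====

-- max of all counter values, floored at 0 (what A's inline maxi tracks)
def pvVmax (ks : List String) : Int := ((PySem.Dict.counter ks).values).foldl max 0

-- the same maximum, phrased over the distinct keys (what B's loop tracks)
def pvM (l : List String) : Int :=
  ((PySem.Set.ofList l).map (fun k => (l.count k : Int))).foldl max 0

-- the winners with count m, in first-occurrence order
def pvW (l : List String) (m : Int) : List String :=
  (PySem.Set.ofList l).filter (fun k => (l.count k : Int) == m)

lemma pv_foldl_max_pull (l : List Int) (b c : Int) :
    l.foldl max (max b c) = max (l.foldl max b) c := by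
  induction l generalizing b with
  | nil => rfl
  | cons d t ih =>
    simp only [List.foldl_cons]
    rw [max_right_comm b c d, ih]

lemma pv_foldl_max_bump (s : List String) (f : String → Int) (x : String) (v : Int)
    (hx : x ∈ s) (hnd : s.Nodup) (hv : f x ≤ v) (a : Int) :
    (s.map (fun y => if y = x then v else f y)).foldl max a = max ((s.map f).foldl max a) v := by
  induction s generalizing a with
  | nil => cases hx
  | cons y t ih =>
    rcases List.nodup_cons.mp hnd with ⟨hyn, hnd'⟩
    by_cases hyx : y = x
    · subst hyx
      have hmap : t.map (fun z => if z = y then v else f z) = t.map f := by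
        apply List.map_congr_left
        intro z hz
        have : z ≠ y := fun h => hyn (h ▸ hz)
        simp [this]
      simp only [List.map_cons, List.foldl_cons, hmap]
      rw [pv_foldl_max_pull, pv_foldl_max_pull, max_assoc, max_eq_right hv]
      simp
    · have hx' : x ∈ t := by
        rcases hx with _ | h
        · exact absurd rfl hyx
        · assumption
      simp only [List.map_cons, List.foldl_cons, if_neg hyx]
      exact ih hx' hnd' _

lemma pv_counter_insert (ks : List String) (x : String) :
    (PySem.Dict.counter ks).insert x ((PySem.Dict.counter ks).getD x 0 + 1)
      = PySem.Dict.counter (ks ++ [x]) := by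
  rw [← PySem.Dict.foldl_insert_getD_add_one_eq_counter ks,
      ← PySem.Dict.foldl_insert_getD_add_one_eq_counter (ks ++ [x]),
      List.foldl_append]
  rfl

lemma pv_values_counter (ks : List String) :
    (PySem.Dict.counter ks).values
      = (PySem.Set.ofList ks).map (fun k => ((ks.count k : Nat) : Int)) := by
  simp [PySem.Dict.values, PySem.Dict.items_counter, List.map_map, Function.comp]

lemma pv_vmax_append (ks : List String) (x : String) :
    pvVmax (ks ++ [x]) = max (pvVmax ks) ((ks.count x : Int) + 1) := by
  unfold pvVmax
  rw [pv_values_counter, pv_values_counter, PySem.Set.ofList_append_singleton]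
  by_cases hx : x ∈ ks
  · rw [PySem.Set.add_of_mem ((PySem.Set.mem_ofList ks x).mpr hx)]
    have hmap : (PySem.Set.ofList ks).map (fun k => (((ks ++ [x]).count k : Nat) : Int))
        = (PySem.Set.ofList ks).map (fun y => if y = x then ((ks.count x : Nat) : Int) + 1
            else ((ks.count y : Nat) : Int)) := by
      apply List.map_congr_left
      intro y _
      by_cases hyx : y = x
      · subst hyx; simp [List.count_append]
      · simp [List.count_append, List.count_singleton, hyx, Ne.symm hyx]
    rw [hmap]
    exact pv_foldl_max_bump _ _ x _ ((PySem.Set.mem_ofList ks x).mpr hx)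
      (PySem.Set.nodup_ofList ks) (by omega) 0
  · rw [PySem.Set.add_of_not_mem (fun h => hx ((PySem.Set.mem_ofList ks x).mp h)),
      List.map_append, List.foldl_append]
    have hmap : (PySem.Set.ofList ks).map (fun k => (((ks ++ [x]).count k : Nat) : Int))
        = (PySem.Set.ofList ks).map (fun k => ((ks.count k : Nat) : Int)) := by
      apply List.map_congr_left
      intro y hy
      have hyx : y ≠ x := fun h => hx (h ▸ (PySem.Set.mem_ofList ks y).mp hy)
      simp [List.count_append, List.count_singleton, hyx, Ne.symm hyx]
    rw [hmap]
    have hcx : ks.count x = 0 := List.count_eq_zero.mpr hx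
    simp [List.count_append, hcx]

lemma pv_loopA (ks : List String) :
    ks.foldl
      (fun (s : Int × PySem.Dict String Int) a =>
        let h := s.2.insert a (s.2.getD a 0 + 1)
        (max s.1 (h.getD a 0), h))
      (0, PySem.Dict.empty)
    = (pvVmax ks, PySem.Dict.counter ks) := by
  induction ks using List.reverseRecOn with
  | nil => rfl
  | append_singleton l x ih =>
    rw [List.foldl_append, ih]
    simp only [List.foldl_cons, List.foldl_nil]
    rw [pv_counter_insert]
    have hget : (PySem.Dict.counter (l ++ [x])).getD x 0 = ((l.count x : Nat) : Int) + 1 := by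
      rw [PySem.Dict.getD_counter]
      simp [List.count_append]
    rw [hget, ← pv_vmax_append]

lemma pv_vmax_eq_M (ks : List String) : pvVmax ks = pvM ks := by
  unfold pvVmax pvM
  rw [pv_values_counter]

-- discard commutes with ofList as the corresponding filter
lemma pv_discard_ofList (t : List String) (k : String) :
    PySem.Set.discard (PySem.Set.ofList t) k
      = PySem.Set.ofList (t.filter (fun x => x != k)) := by
  induction t with
  | nil => rfl
  | cons x t ih =>
    rw [PySem.Set.ofList_cons]
    by_cases hx : x = k
    · subst hx
      have hf : (x :: t).filter (fun y => y != x) = t.filter (fun y => y != x) := by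
        simp [List.filter_cons]
      rw [hf, ← ih]
      simp only [PySem.Set.discard, List.filter_cons, List.filter_filter]
      simp
    · have hbne : (x != k) = true := bne_iff_ne.mpr hx
      have hf : (x :: t).filter (fun y => y != k) = x :: t.filter (fun y => y != k) := by
        simp [List.filter_cons, hbne]
      rw [hf, PySem.Set.ofList_cons, ← ih]
      simp only [PySem.Set.discard, List.filter_cons, List.filter_filter]
      have hxk : (!x == k) = true := by simp [hx]
      rw [if_pos hxk]
      congr 1
      apply List.filter_congr
      intro y _
      exact Bool.and_comm _ _

lemma pv_ofList_cons (k : String) (t : List String) :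
    PySem.Set.ofList (k :: t) = k :: PySem.Set.ofList (t.filter (fun x => x != k)) := by
  rw [PySem.Set.ofList_cons, pv_discard_ofList]

lemma pv_count_filter_ne (t : List String) (k y : String) (hy : y ≠ k) :
    (t.filter (fun x => x != k)).count y = t.count y := by
  induction t with
  | nil => rfl
  | cons x t ih =>
    by_cases hx : x = k
    · subst hx
      have hf : (x :: t).filter (fun z => z != x) = t.filter (fun z => z != x) := by
        simp [List.filter_cons]
      rw [hf, ih, List.count_cons_of_ne (Ne.symm hy)]
    · have hbne : (x != k) = true := bne_iff_ne.mpr hx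
      simp only [List.filter_cons, hbne, if_pos]
      by_cases hxy : x = y
      · subst hxy
        rw [List.count_cons_self, List.count_cons_self, ih]
      · rw [List.count_cons_of_ne hxy, List.count_cons_of_ne hxy, ih]

lemma pv_M_nonneg (l : List String) : 0 ≤ pvM l := by
  unfold pvM
  have : ∀ (s : List Int) (a : Int), a ≤ s.foldl max a := by
    intro s
    induction s with
    | nil => intro a; exact le_refl a
    | cons x t ih =>
      intro a
      calc a ≤ max a x := le_max_left a x
        _ ≤ t.foldl max (max a x) := ih _
  exact this _ 0

lemma pv_M_cons (k : String) (t : List String) :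
    pvM (k :: t) = max (((k :: t).count k : Nat) : Int)
      (pvM (t.filter (fun x => x != k))) := by
  unfold pvM
  rw [pv_ofList_cons]
  simp only [List.map_cons, List.foldl_cons]
  have hmap : (PySem.Set.ofList (t.filter (fun x => x != k))).map
      (fun y => (((k :: t).count y : Nat) : Int))
      = (PySem.Set.ofList (t.filter (fun x => x != k))).map
      (fun y => (((t.filter (fun x => x != k)).count y : Nat) : Int)) := by
    apply List.map_congr_left
    intro y hy
    have hyk : y ≠ k := by
      have := (PySem.Set.mem_ofList _ _).mp hy
      rcases List.mem_filter.mp this with ⟨_, h2⟩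
      exact bne_iff_ne.mp h2
    rw [List.count_cons_of_ne (Ne.symm hyk), pv_count_filter_ne t k y hyk]
  rw [hmap, pv_foldl_max_pull]
  rw [max_comm]

lemma pv_W_cons (k : String) (t : List String) (m : Int) :
    pvW (k :: t) m
      = (if (((k :: t).count k : Nat) : Int) == m then [k] else [])
        ++ pvW (t.filter (fun x => x != k)) m := by
  unfold pvW
  rw [pv_ofList_cons]
  simp only [List.filter_cons]
  by_cases hc : (((k :: t).count k : Nat) : Int) == m
  · rw [if_pos hc, if_pos hc]
    simp only [List.singleton_append, List.cons.injEq, true_and]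
    apply List.filter_congr
    intro y hy
    have hyk : y ≠ k := by
      have := (PySem.Set.mem_ofList _ _).mp hy
      rcases List.mem_filter.mp this with ⟨_, h2⟩
      exact bne_iff_ne.mp h2
    rw [List.count_cons_of_ne (Ne.symm hyk), pv_count_filter_ne t k y hyk]
  · rw [if_neg (by simpa using hc), if_neg (by simpa using hc)]
    simp only [List.nil_append]
    apply List.filter_congr
    intro y hy
    have hyk : y ≠ k := by
      have := (PySem.Set.mem_ofList _ _).mp hy
      rcases List.mem_filter.mp this with ⟨_, h2⟩
      exact bne_iff_ne.mp h2
    rw [List.count_cons_of_ne (Ne.symm hyk), pv_count_filter_ne t k y hyk]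

-- sorted-list bridge: after the head, the equal prefix is ALL the copies of the head
lemma pv_dropWhile_eq_filter (k : String) (t : List String)
    (hk : ∀ y ∈ t, k ≤ y) (hp : t.Pairwise (· ≤ ·)) :
    t.dropWhile (fun x => x == k) = t.filter (fun x => x != k) := by
  induction t with
  | nil => rfl
  | cons x t ih =>
    rcases List.pairwise_cons.mp hp with ⟨hx, hp'⟩
    by_cases hxk : x = k
    · subst hxk
      rw [List.dropWhile_cons_of_pos (by simp)]
      have hf : (x :: t).filter (fun y => y != x) = t.filter (fun y => y != x) := by
        simp [List.filter_cons]
      rw [hf]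
      exact ih (fun y hy => hk y (List.mem_cons_of_mem x hy)) hp'
    · rw [List.dropWhile_cons_of_neg (by simp [hxk])]
      have hbne : (x != k) = true := bne_iff_ne.mpr hxk
      rw [List.filter_cons, if_pos hbne]
      congr 1
      symm
      apply List.filter_eq_self.mpr
      intro y hy
      have hky : k ≤ x := hk x (by simp)
      have hkx : k < x := lt_of_le_of_ne hky (Ne.symm hxk)
      have hxy : x ≤ y := hx y hy
      refine bne_iff_ne.mpr (fun h => ?_)
      subst h
      exact absurd (lt_of_lt_of_le hkx hxy) (lt_irrefl y)

lemma pv_takeWhile_count (k : String) (t : List String)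
    (hk : ∀ y ∈ t, k ≤ y) (hp : t.Pairwise (· ≤ ·)) :
    ((1 + (t.takeWhile (fun x => x == k)).length : Nat) : Int)
      = (((k :: t).count k : Nat) : Int) := by
  have h : (t.takeWhile (fun x => x == k)).length = t.count k := by
    induction t with
    | nil => rfl
    | cons x t ih =>
      rcases List.pairwise_cons.mp hp with ⟨hx, hp'⟩
      by_cases hxk : x = k
      · subst hxk
        rw [List.takeWhile_cons_of_pos (by simp), List.count_cons_self]
        simp only [List.length_cons]
        rw [ih (fun y hy => hk y (List.mem_cons_of_mem x hy)) hp']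
      · rw [List.takeWhile_cons_of_neg (by simp [hxk]),
          List.count_cons_of_ne hxk]
        have hky : k < x := lt_of_le_of_ne (hk x (by simp)) (Ne.symm hxk)
        have hz : t.count k = 0 := List.count_eq_zero.mpr (by
          intro hmem
          exact absurd (lt_of_lt_of_le hky (hx k hmem)) (lt_irrefl k))
        simp [hz]
  rw [List.count_cons_self, h]
  push_cast
  omega

-- the argmax-collect invariant of B's run scan, over a sorted list
lemma pv_scan_aux (n : Nat) : ∀ (l : List String), l.length ≤ n →
    l.Pairwise (· ≤ ·) →
    ∀ (b : Int) (w : List String), 0 ≤ b →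
    pvScan l b w
      = (max b (pvM l),
         (if pvM l ≤ b then w else []) ++ pvW l (max b (pvM l))) := by
  induction n with
  | zero =>
    intro l hl _ b w hb
    have hnil : l = [] := List.eq_nil_of_length_eq_zero (Nat.le_zero.mp hl)
    subst hnil
    have h0 : pvM ([] : List String) = 0 := rfl
    have hw : pvW ([] : List String) (max b 0) = [] := rfl
    rw [pvScan, h0, hw, if_pos hb, max_eq_left hb, List.append_nil]
  | succ n ihn =>
  intro l hl hsort
  rcases l with _ | ⟨k, t⟩
  · intro b w hb
    have h0 : pvM ([] : List String) = 0 := rfl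
    have hw : pvW ([] : List String) (max b 0) = [] := rfl
    rw [pvScan, h0, hw, if_pos hb, max_eq_left hb, List.append_nil]
  · intro b w hb
    rcases List.pairwise_cons.mp hsort with ⟨hk, hp⟩
    rw [pvScan]
    rw [pv_takeWhile_count k t hk hp, pv_dropWhile_eq_filter k t hk hp]
    set c : Int := (((k :: t).count k : Nat) : Int) with hc
    set rest := t.filter (fun x => x != k) with hrest
    have hrsort : rest.Pairwise (· ≤ ·) := hp.sublist List.filter_sublist
    have hlen : rest.length ≤ n := by
      rw [hrest]
      have := (List.filter_sublist (l := t) (p := fun x => x != k)).length_le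
      simp only [List.length_cons] at hl
      omega
    have ih : ∀ (b : Int) (w : List String), 0 ≤ b →
        pvScan rest b w
          = (max b (pvM rest),
             (if pvM rest ≤ b then w else []) ++ pvW rest (max b (pvM rest))) :=
      fun b w hb => ihn rest hlen hrsort b w hb
    have hM : pvM (k :: t) = max c (pvM rest) := by rw [hrest, pv_M_cons]
    have hWc : ∀ m, pvW (k :: t) m = (if c == m then [k] else []) ++ pvW rest m := by
      intro m; rw [hrest, pv_W_cons]
    have hc1 : 1 ≤ c := by
      rw [hc]
      have : 1 ≤ (k :: t).count k := List.count_pos_iff.mpr (by simp)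
      omega
    have hMr : 0 ≤ pvM rest := pv_M_nonneg rest
    by_cases h1 : c > b
    · rw [if_pos (by exact_mod_cast h1)]
      rw [ih c [k] (by omega)]
      have hmb : max b (pvM (k :: t)) = pvM (k :: t) := by
        rw [hM]; omega
      have houter : ¬ pvM (k :: t) ≤ b := by rw [hM]; omega
      rw [hmb, if_neg houter, List.nil_append, hWc, hM]
      by_cases h2 : pvM rest ≤ c
      · rw [if_pos h2, max_eq_left h2, if_pos (by simp)]
      · rw [if_neg h2, max_eq_right (by omega), if_neg (by simp; omega), List.nil_append]
    · rw [if_neg (by exact_mod_cast h1)]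
      by_cases h2 : c = b
      · rw [if_pos (by simp [h2])]
        rw [ih b (w ++ [k]) hb]
        have hMkt : pvM (k :: t) = max b (pvM rest) := by rw [hM, h2]
        have hmb : max b (pvM (k :: t)) = max b (pvM rest) := by rw [hMkt]; omega
        rw [hmb, hMkt, hWc]
        by_cases h3 : pvM rest ≤ b
        · rw [if_pos h3, if_pos (by omega), max_eq_left h3, if_pos (by simp [h2])]
          simp
        · rw [if_neg h3, if_neg (by omega), max_eq_right (by omega),
            if_neg (by simp; omega), List.nil_append, List.nil_append]
      · have h4 : c < b := by omega
        rw [if_neg (by simp [h2])]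
        rw [ih b w hb]
        have hMkt : pvM (k :: t) = max c (pvM rest) := hM
        have hmb : max b (pvM (k :: t)) = max b (pvM rest) := by rw [hMkt]; omega
        rw [hmb, hWc]
        have hiff : pvM (k :: t) ≤ b ↔ pvM rest ≤ b := by rw [hMkt]; omega
        by_cases h3 : pvM rest ≤ b
        · rw [if_pos (hiff.mpr h3), if_pos h3, max_eq_left h3, if_neg (by simp; omega),
            List.nil_append]
        · rw [if_neg (fun h => h3 (hiff.mp h)), if_neg h3, max_eq_right (by omega),
            if_neg (by simp; omega)]
          rfl

lemma pv_scan_init (l : List String) (hsort : l.Pairwise (· ≤ ·)) :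
    pvScan l 0 [] = (pvM l, pvW l (pvM l)) := by
  rw [pv_scan_aux l.length l (le_refl _) hsort 0 [] (le_refl 0),
    max_eq_right (pv_M_nonneg l)]
  split_ifs <;> rfl

-- A's winner list is pvW
lemma pv_winnersA (ks : List String) (m : Int) :
    ((PySem.Dict.counter ks).items.filter (fun p => p.2 == m)).map Prod.fst
      = pvW ks m := by
  rw [PySem.Dict.items_counter]
  unfold pvW
  rw [List.filter_map, List.map_map]
  simp [Function.comp_def]

-- set(xs) keeps first occurrences, so it is a sublist of xs
lemma pv_ofList_sublist (xs : List String) : (PySem.Set.ofList xs).Sublist xs := by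
  induction xs with
  | nil => exact List.Sublist.refl _
  | cons x t ih =>
    rw [PySem.Set.ofList_cons]
    exact List.Sublist.cons₂ x (List.Sublist.trans
      (by simp only [PySem.Set.discard]; exact List.filter_sublist) ih)

lemma pv_ofList_perm (xs ys : List String) (h : xs.Perm ys) :
    (PySem.Set.ofList xs).Perm (PySem.Set.ofList ys) := by
  apply (List.perm_ext_iff_of_nodup (PySem.Set.nodup_ofList xs)
    (PySem.Set.nodup_ofList ys)).mpr
  intro a
  rw [PySem.Set.mem_ofList, PySem.Set.mem_ofList]
  exact ⟨fun ha => h.mem_iff.mp ha, fun ha => h.mem_iff.mpr ha⟩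

lemma pv_foldl_max_perm (l1 l2 : List Int) (h : l1.Perm l2) :
    ∀ (a : Int), l1.foldl max a = l2.foldl max a := by
  induction h with
  | nil => intro a; rfl
  | cons x _ ih =>
    intro a
    simp only [List.foldl_cons]
    exact ih _
  | swap x y l =>
    intro a
    simp only [List.foldl_cons]
    rw [max_right_comm]
  | trans _ _ ih1 ih2 =>
    intro a
    rw [ih1 a, ih2 a]

lemma pv_M_perm (xs ys : List String) (h : xs.Perm ys) : pvM xs = pvM ys := by
  unfold pvM
  have hmap : (PySem.Set.ofList xs).map (fun k => ((xs.count k : Nat) : Int))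
      |>.Perm ((PySem.Set.ofList ys).map (fun k => ((ys.count k : Nat) : Int))) := by
    have h1 : (PySem.Set.ofList xs).map (fun k => ((xs.count k : Nat) : Int))
        = (PySem.Set.ofList xs).map (fun k => ((ys.count k : Nat) : Int)) := by
      apply List.map_congr_left
      intro a _
      rw [h.count_eq]
    rw [h1]
    exact (pv_ofList_perm xs ys h).map _
  exact pv_foldl_max_perm _ _ hmap 0

lemma pv_W_perm (xs ys : List String) (h : xs.Perm ys) (m : Int) :
    (pvW xs m).Perm (pvW ys m) := by
  unfold pvW
  have h1 : (PySem.Set.ofList xs).filter (fun k => ((xs.count k : Nat) : Int) == m)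
      = (PySem.Set.ofList xs).filter (fun k => ((ys.count k : Nat) : Int) == m) := by
    apply List.filter_congr
    intro a _
    rw [h.count_eq]
  rw [h1]
  exact (pv_ofList_perm xs ys h).filter _

-- the winners over the sorted key list are strictly increasing
lemma pv_W_pairwise_lt (l : List String) (hsort : l.Pairwise (· ≤ ·)) (m : Int) :
    (pvW l m).Pairwise (· < ·) := by
  unfold pvW
  have hle : (PySem.Set.ofList l).Pairwise (· ≤ ·) :=
    hsort.sublist (pv_ofList_sublist l)
  have hnd : (PySem.Set.ofList l).Nodup := PySem.Set.nodup_ofList l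
  have hlt : (PySem.Set.ofList l).Pairwise (· < ·) := by
    have := hle.and hnd
    exact this.imp (fun h => lt_of_le_of_ne h.1 h.2)
  exact hlt.filter _

-- B's winners list IS A's winners list, sorted
lemma pv_W_sorted (ks : List String) (m : Int) :
    PySem.List.sorted (pvW ks m) (fun x => x)
      = pvW (PySem.List.sorted ks (fun x => x)) m := by
  apply PySem.List.sorted_eq_of_perm_of_pairwise_lt
  · exact (pv_W_perm (PySem.List.sorted ks (fun x => x)) ks
      (PySem.List.sorted_perm ks (fun x => x) false)) m
  · exact pv_W_pairwise_lt _ (by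
      have := PySem.List.sorted_pairwise ks (fun x => x)
      simpa using this) m

-- ===== VERDICT (by name: the statement is the Claim_ definition above) =====
theorem IPfreqCount_spec : Claim_equal_IPfreqCount := by
  intro addresses _ _
  unfold Spec_IPfreqCount IPfreqCount IPfreqCount_alt
  set ks := addresses.map (fun addr => (PySem.Str.split₀ addr).headD "") with hks
  have hA : addresses.foldl
      (fun (s : Int × PySem.Dict String Int) addr =>
        let a := (PySem.Str.split₀ addr).headD ""
        let h := s.2.insert a (s.2.getD a 0 + 1)
        (max s.1 (h.getD a 0), h))
      (0, PySem.Dict.empty)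
      = (pvVmax ks, PySem.Dict.counter ks) := by
    rw [hks, ← pv_loopA (addresses.map (fun addr => (PySem.Str.split₀ addr).headD "")),
      List.foldl_map]
  set s := PySem.List.sorted ks (fun x => x) with hs
  have hsort : s.Pairwise (· ≤ ·) := by
    have := PySem.List.sorted_pairwise ks (fun x => x)
    simpa using this
  have hperm : s.Perm ks := PySem.List.sorted_perm ks (fun x => x) false
  simp only [hA, pv_scan_init s hsort, pv_winnersA, pv_vmax_eq_M]
  rw [← pv_M_perm s ks hperm]
  rw [pv_W_sorted ks (pvM s), ← hs]
  have hWp : (pvW s (pvM s)).Perm (pvW ks (pvM s)) := pv_W_perm s ks hperm _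
  rcases hW : pvW s (pvM s) with _ | ⟨x, rest⟩
  · rw [hW] at hWp
    have hA0 : pvW ks (pvM s) = [] := hWp.symm.eq_nil
    rw [hA0]
  · rcases rest with _ | ⟨y, rest2⟩
    · rw [hW] at hWp
      have hA1 : pvW ks (pvM s) = [x] := List.perm_singleton.mp hWp.symm
      rw [hA1]
    · rw [hW] at hWp
      have hlenA : (pvW ks (pvM s)).length = (x :: y :: rest2).length := hWp.length_eq.symm
      rw [if_pos (by rw [hlenA]; simp), if_pos (by simp)]
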